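-- pv_equiv track=rewrite | github.com/Gunikatanwar16/Agentic-honeypot | app/extraction/intel_extractor.py | is_suspicious_url
-- ===== SOURCE A (Python) =====
-- def is_suspicious_url(url: str) -> bool:
--     """URL suspicious hai ya nahi"""
--     bad_signs = [
--         'bit.ly', 'tinyurl', 'goo.gl',
--         'login', 'verify', 'confirm',
--         '.tk', '.ml', '.ga', '.cf',
--         'http://'
--     ]
--     return any(sign in url.lower() for sign in bad_signs)
-- ===== SOURCE B (Python) =====
-- _BAD_SIGNS = [
--     'bit.ly', 'tinyurl', 'goo.gl',
--     'login', 'verify', 'confirm',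
--     '.tk', '.ml', '.ga', '.cf',
--     'http://'
-- ]
--
-- def is_suspicious_url(url: str) -> bool:
--     """URL suspicious hai ya nahi"""
--     s = url.lower()
--     # single left-to-right scan: at each position, does any bad sign start here?
--     for i in range(len(s) + 1):
--         for sign in _BAD_SIGNS:
--             if s.startswith(sign, i):
--                 return True
--     return False
-- ===== Notes on version B (the rewrite author's own statement) =====
-- stated objective: alternative
-- what changed: Replaced eleven independent per-pattern substring-membership scans with one left-to-right scan of the lowered URL that checks at each position whether any bad sign starts there (multi-pattern scan instead of per-pattern membership).
import Mathlib
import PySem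

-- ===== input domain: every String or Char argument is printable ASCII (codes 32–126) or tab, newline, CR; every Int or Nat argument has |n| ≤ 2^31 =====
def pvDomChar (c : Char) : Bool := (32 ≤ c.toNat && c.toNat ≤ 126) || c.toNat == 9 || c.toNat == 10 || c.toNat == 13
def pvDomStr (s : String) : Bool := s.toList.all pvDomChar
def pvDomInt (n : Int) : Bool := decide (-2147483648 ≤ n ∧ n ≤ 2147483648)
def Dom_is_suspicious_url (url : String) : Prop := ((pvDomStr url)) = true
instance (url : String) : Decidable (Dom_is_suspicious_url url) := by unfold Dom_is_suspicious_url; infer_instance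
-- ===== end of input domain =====

-- B replaces eleven per-pattern 'in' substring scans by one left-to-right scan of the
-- lowered URL checking at each position whether any bad sign starts there (alternative,
-- same cost; return-value equivalence only, neither program mutates anything).

-- ===== PORT A =====
def badSigns : List String :=
  ["bit.ly", "tinyurl", "goo.gl",
   "login", "verify", "confirm",
   ".tk", ".ml", ".ga", ".cf",
   "http://"]

def is_suspicious_url (url : String) : Bool :=
  badSigns.any (fun sign => PySem.Str.isIn sign (PySem.Str.lower url))

-- ===== PORT B =====
-- scan of Source B: at each suffix (position i), does any bad sign start here?
def scanSigns (signs : List String) : List Char → Bool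
  | [] => signs.any (fun p => PySem.Chars.startswith [] p.toList)
  | c :: t =>
      if signs.any (fun p => PySem.Chars.startswith (c :: t) p.toList) then true
      else scanSigns signs t

def is_suspicious_url_alt (url : String) : Bool :=
  scanSigns badSigns (PySem.Str.lower url).toList

-- ===== PRECONDITION & SPEC =====
def Spec_is_suspicious_url (url : String) (out : Bool) : Prop := out = is_suspicious_url_alt url
instance (url : String) (out : Bool) : Decidable (Spec_is_suspicious_url url out) := by unfold Spec_is_suspicious_url; infer_instance

-- ===== CLAIM (what is proved, stated in full; the proofs are below) =====
def Claim_equal_is_suspicious_url : Prop := ∀ (url : String), Dom_is_suspicious_url url → Spec_is_suspicious_url url (is_suspicious_url url)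

-- ===== LEMMAS AND PROOFS =====

theorem scanSigns_iff (signs : List String) (s : List Char) :
    scanSigns signs s = true ↔ ∃ p ∈ signs, p.toList <:+: s := by
  induction s with
  | nil =>
      simp [scanSigns, List.any_eq_true, PySem.Chars.startswith_iff,
        List.prefix_nil, List.infix_nil]
  | cons c t ih =>
      simp only [scanSigns]
      split_ifs with h
      · simp only [true_iff]
        rcases List.any_eq_true.mp h with ⟨p, hp, hpre⟩
        exact ⟨p, hp, ((PySem.Chars.startswith_iff _ _).mp hpre).isInfix⟩
      · rw [ih]
        constructor
        · rintro ⟨p, hp, hinf⟩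
          exact ⟨p, hp, hinf.trans (List.infix_cons_iff.mpr (Or.inr (List.infix_refl t)) : t <:+: c :: t)⟩
        · rintro ⟨p, hp, hinf⟩
          rcases List.infix_cons_iff.mp hinf with hpre | hinf'
          · exact absurd (List.any_eq_true.mpr ⟨p, hp, (PySem.Chars.startswith_iff _ _).mpr hpre⟩) h
          · exact ⟨p, hp, hinf'⟩

-- ===== VERDICT (by name: the statement is the Claim_ definition above) =====
theorem is_suspicious_url_spec : Claim_equal_is_suspicious_url := by
  intro url _
  unfold Spec_is_suspicious_url is_suspicious_url is_suspicious_url_alt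
  rw [Bool.eq_iff_iff, scanSigns_iff, List.any_eq_true]
  constructor <;> rintro ⟨p, hp, h⟩
  · exact ⟨p, hp, (PySem.Str.isIn_iff_infix _ _).mp h⟩
  · exact ⟨p, hp, (PySem.Str.isIn_iff_infix _ _).mpr h⟩
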